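-- pv_equiv track=rewrite | github.com/skyg547/pythoncodingtest | testebay/test01.py | solution
-- ===== SOURCE A (Python) =====
-- from itertools import product
--
-- def solution(schedule):
--     dayChangeMap = {"MO": 0, "TU": 1, "WE": 2, "TH": 3, "FR": 4}
--     day = []
--
--     # 날짜 배열 딕셔너리 초기화
--     for _ in range(len(schedule)):
--         time = {}
--         for clock in range(90, 211, 5):
--             time[clock] = 0
--         day.append(time)
--
--     failTime = 0  # 실패 스케줄
--
--     # 모든 스케줄 경우의수
--     tempSchedules = list(product(*schedule))
--     for tempSchedule in tempSchedules:  ## 임시 스케줄을 돌면서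
--         nextSchedule = True  # 다음 스케줄이 맞는지 확인
--
--         for classTime in tempSchedule:  ## 과목 시간들을 확인 한다
--
--             classPartTime = classTime.split()
--             tempday = 0  # 임시 날짜
--             for partTime in classPartTime:  ## 과목 시간이 여러 일 경우를 위해 반복면
--                 if partTime in dayChangeMap.keys():  # 날짜 인지 구분 한다.
--                     tempday = dayChangeMap[partTime]  # 날짜 입력
--                 else:
--                     timeclass = int(partTime.replace(":30", "5").replace(":00", "0"))
--
--                     if len(classPartTime) > 2:  # 2보다 클때 1시간 30분
--                         # 1시간 30분 이전 까지 빈 과목이라면 1로 채워주고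
--                         if day[tempday][timeclass] == 0 and day[tempday][timeclass + 5] == 0 and day[tempday][
--                             timeclass + 10] == 0:
--                             day[tempday][timeclass] = 1
--                             day[tempday][timeclass + 5] = 1
--                             day[tempday][timeclass + 10] = 1
--                         # 아니라면 실패 시킨다
--                         else:
--                             failTime += 1
--                             nextSchedule = False
--
--                     else:  # 과목이 2개라 3 시간 일때 3시간 전까지 체크 해주고
--                         if day[tempday][timeclass] == 0 \
--                                 and day[tempday][timeclass + 5] == 0 \
--                                 and day[tempday][timeclass + 10] == 0 \
--                                 and day[tempday][timeclass + 15] == 0 \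
--                                 and day[tempday][timeclass + 20] == 0 \
--                                 and day[tempday][timeclass + 25] == 0:
--                             day[tempday][timeclass] = 1
--                             day[tempday][timeclass + 5] = 1
--                             day[tempday][timeclass + 10] = 1
--                             day[tempday][timeclass + 15] = 1
--                             day[tempday][timeclass + 20] = 1
--                             day[tempday][timeclass + 25] = 1
--                         else:
--                             failTime += 1
--                             nextSchedule = False
--                     tempday = 0  # 날짜 를초기화
--
--                     if not nextSchedule:  # 실패 한 경우라면 탈출
--                         break
--
--             if not nextSchedule:
--                 break
--         # 날짜 배열 딕셔너리 초기화
--         day = []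
--         for _ in range(len(schedule)):
--             time = {}
--             for clock in range(90, 211, 5):
--                 time[clock] = 0
--             day.append(time)
--
--     return len(tempSchedules) - failTime
-- ===== SOURCE B (Python) =====
-- def solution(schedule):
--     day_idx = {"MO": 0, "TU": 1, "WE": 2, "TH": 3, "FR": 4}
--
--     # a subject with no options admits no combination at all
--     if any(not opts for opts in schedule):
--         return 0
--
--     def parse(opt):
--         toks = opt.split()
--         span = 3 if len(toks) > 2 else 6
--         marks = []
--         d = 0
--         for t in toks:
--             if t in day_idx:
--                 d = day_idx[t]
--             else:
--                 start = int(t.replace(":30", "5").replace(":00", "0"))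
--                 for k in range(span):
--                     marks.append((d, start + 5 * k))
--                 d = 0
--         return marks
--
--     parsed = [[parse(o) for o in opts] for opts in schedule]
--
--     def count(i, occupied):
--         if i == len(parsed):
--             return 1
--         total = 0
--         for marks in parsed[i]:
--             placed = []
--             ok = True
--             for m in marks:
--                 if m in occupied:
--                     ok = False
--                     break
--                 occupied.add(m)
--                 placed.append(m)
--             if ok:
--                 total += count(i + 1, occupied)
--             for m in placed:
--                 occupied.remove(m)
--         return total
--
--     return count(0, set())
-- ===== Notes on version B (the rewrite author's own statement) =====
-- stated objective: alternative
-- what changed: A materialises itertools.product(*schedule) and re-parses and simulates every combination on freshly rebuilt per-day slot dicts; B parses each option string once into a list of (day, slot) marks and counts valid combinations by recursive backtracking over the subjects with a single occupied-slot set, pruning a branch at the first conflicting mark.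
-- outside the precondition, e.g. on solution([['10:00 10:00 20:30']]): A returns 0, B returns 0; on solution([['9:00 TU']]): A returns 1, B returns 1
import Mathlib
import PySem

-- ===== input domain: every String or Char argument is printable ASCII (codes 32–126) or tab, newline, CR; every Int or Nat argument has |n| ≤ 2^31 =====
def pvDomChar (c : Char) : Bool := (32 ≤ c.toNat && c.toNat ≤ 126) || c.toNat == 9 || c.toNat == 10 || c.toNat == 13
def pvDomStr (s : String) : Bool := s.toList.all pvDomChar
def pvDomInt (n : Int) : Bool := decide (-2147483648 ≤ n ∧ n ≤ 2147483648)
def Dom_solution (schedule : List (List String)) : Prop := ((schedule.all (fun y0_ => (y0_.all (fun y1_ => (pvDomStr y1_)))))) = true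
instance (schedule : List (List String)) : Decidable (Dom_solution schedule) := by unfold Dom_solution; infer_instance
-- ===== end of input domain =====

-- B replaces A's "materialise itertools.product and simulate each combination on per-day dicts"
-- with "parse every option once into (day, slot) marks, then count by recursive backtracking
-- over subjects with one occupied-slot set" (objective: alternative decomposition).

-- shared constant/parsing helpers (used by both ports and by Pre_)
def pvDayMap : PySem.Dict String Int :=
  PySem.Dict.ofList [("MO", 0), ("TU", 1), ("WE", 2), ("TH", 3), ("FR", 4)]

-- int(partTime.replace(":30", "5").replace(":00", "0"))  (none = ValueError)
def pvTokVal (t : String) : Option Int :=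
  PySem.Int.ofStr? (PySem.Str.replace (PySem.Str.replace t ":30" "5") ":00" "0")

-- ===== PORT A =====
-- time = {}; for clock in range(90, 211, 5): time[clock] = 0
def pvRow0 : PySem.Dict Int Int :=
  (PySem.List.pyRange 90 211 5).foldl (fun t c => t.insert c 0) PySem.Dict.empty

-- day = []; for _ in range(len(schedule)): … day.append(time)
def pvInitDay (n : Nat) : List (PySem.Dict Int Int) :=
  (List.range n).map (fun _ => pvRow0)

-- day[d][tc]  (Python raises KeyError/IndexError where the defaults fire; exact under Pre_)
def pvRowGet (day : List (PySem.Dict Int Int)) (d tc : Int) : Int :=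
  (PySem.List.pyGetD day d PySem.Dict.empty).getD tc 0

-- day[d][tc] = 1
def pvMarkSlot (day : List (PySem.Dict Int Int)) (d tc : Int) : List (PySem.Dict Int Int) :=
  PySem.List.pySetD day d ((PySem.List.pyGetD day d PySem.Dict.empty).insert tc 1)

-- the inner `for partTime in classPartTime` loop (big ↔ len(classPartTime) > 2);
-- returns (day, nextSchedule)
def pvTokens (big : Bool) : List String → List (PySem.Dict Int Int) → Int → (List (PySem.Dict Int Int) × Bool)
  | [], day, _ => (day, true)
  | t :: rest, day, tempday =>
    match PySem.Dict.get? pvDayMap t with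
    | some d => pvTokens big rest day d
    | none =>
      let tc := (pvTokVal t).getD 0
      if big then
        if pvRowGet day tempday tc = 0 ∧ pvRowGet day tempday (tc + 5) = 0 ∧
           pvRowGet day tempday (tc + 10) = 0 then
          pvTokens big rest
            (pvMarkSlot (pvMarkSlot (pvMarkSlot day tempday tc) tempday (tc + 5)) tempday (tc + 10)) 0
        else (day, false)
      else
        if pvRowGet day tempday tc = 0 ∧ pvRowGet day tempday (tc + 5) = 0 ∧
           pvRowGet day tempday (tc + 10) = 0 ∧ pvRowGet day tempday (tc + 15) = 0 ∧
           pvRowGet day tempday (tc + 20) = 0 ∧ pvRowGet day tempday (tc + 25) = 0 then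
          pvTokens big rest
            (pvMarkSlot (pvMarkSlot (pvMarkSlot (pvMarkSlot (pvMarkSlot (pvMarkSlot day tempday tc)
              tempday (tc + 5)) tempday (tc + 10)) tempday (tc + 15)) tempday (tc + 20)) tempday (tc + 25)) 0
        else (day, false)

-- the `for classTime in tempSchedule` loop with the nextSchedule early exit
def pvCombo : List String → List (PySem.Dict Int Int) → Bool
  | [], _ => true
  | ct :: rest, day =>
    let toks := PySem.Str.split₀ ct
    let r := pvTokens (decide (toks.length > 2)) toks day 0
    if r.2 then pvCombo rest r.1 else false

-- list(product(*schedule))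
def pvProd : List (List String) → List (List String)
  | [] => [[]]
  | xs :: rest => xs.flatMap (fun x => (pvProd rest).map (fun t => x :: t))

def solution (schedule : List (List String)) : Int :=
  let tempSchedules := pvProd schedule
  -- `day` is re-initialised at the end of every iteration, so each iteration starts
  -- from pvInitDay; failTime is the fold state
  let failTime : Int := tempSchedules.foldl
    (fun f ts => if pvCombo ts (pvInitDay schedule.length) then f else f + 1) 0
  (tempSchedules.length : Int) - failTime

-- ===== PORT B =====
-- parse(opt): option string → list of (day, slot) marks
def pvParse (opt : String) : List (Int × Int) :=
  let toks := PySem.Str.split₀ opt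
  let span : Int := if toks.length > 2 then 3 else 6
  (toks.foldl (fun (acc : List (Int × Int) × Int) t =>
      match PySem.Dict.get? pvDayMap t with
      | some d => (acc.1, d)
      | none =>
        let s := (pvTokVal t).getD 0
        ((PySem.List.pyRange 0 span 1).foldl (fun ms k => ms ++ [(acc.2, s + 5 * k)]) acc.1, 0))
    ([], 0)).1

-- the mark/undo loop of Source B, ported persistently: failure returns none and the caller
-- keeps using its own (unchanged) set, which is exactly the undo of `placed`
def pvPlace : List (Int × Int) → PySem.Set (Int × Int) → Option (PySem.Set (Int × Int))
  | [], occ => some occ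
  | m :: ms, occ => if PySem.Set.contains occ m then none else pvPlace ms (PySem.Set.add occ m)

-- count(i, occupied): backtracking over the remaining subjects
def pvCount : List (List (List (Int × Int))) → PySem.Set (Int × Int) → Int
  | [], _ => 1
  | opts :: rest, occ =>
    opts.foldl (fun tot ms =>
      tot + (match pvPlace ms occ with
             | some occ' => pvCount rest occ'
             | none => 0)) 0

def solution_alt (schedule : List (List String)) : Int :=
  -- a subject with no options admits no combination at all
  if schedule.any (fun opts => opts.isEmpty) then 0
  else pvCount (schedule.map (fun opts => opts.map pvParse)) PySem.Set.empty

-- ===== PRECONDITION & SPEC =====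
-- one token is safe for A: a weekday naming an existing row, or a time whose whole
-- 3-slot (big) / 6-slot block stays inside the dict keys 90,95,…,210
def pvTokOK (n : Nat) (big : Bool) (t : String) : Bool :=
  match PySem.Dict.get? pvDayMap t with
  | some d => decide (d.toNat < n)
  | none =>
    match pvTokVal t with
    | some v => decide (90 ≤ v ∧ PySem.Int.mod v 5 = 0 ∧ v + (if big then 10 else 25) ≤ 210)
    | none => false

def pvOptOK (n : Nat) (opt : String) : Bool :=
  (PySem.Str.split₀ opt).all (pvTokOK n (decide ((PySem.Str.split₀ opt).length > 2)))

-- Pre_ excludes inputs where A raises (ValueError from int(), KeyError on a slot outside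
-- 90..210, IndexError on a weekday ≥ len(schedule)). If some subject has no options the
-- product is empty and A returns 0 without reading any string, so those inputs are admitted
-- unconditionally. Pre_ is slightly narrower than "A returns": it requires EVERY token to be
-- statically safe, while A can also return when an unsafe access is never reached
-- (skipped after an earlier conflict, or a trailing unused weekday).
def Pre_solution (schedule : List (List String)) : Prop :=
  (∃ opts ∈ schedule, opts = []) ∨ ∀ opts ∈ schedule, ∀ opt ∈ opts, pvOptOK schedule.length opt = true

instance (schedule : List (List String)) : Decidable (Pre_solution schedule) := by
  unfold Pre_solution; infer_instance

def pvWitness_solution : List (List String) :=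
  [["MO 10:00 12:00", "TU 10:00"], ["11:00", "MO 10:30"]]

def Spec_solution (schedule : List (List String)) (out : Int) : Prop := out = solution_alt schedule
instance (schedule : List (List String)) (out : Int) : Decidable (Spec_solution schedule out) := by
  unfold Spec_solution; infer_instance

-- ===== CLAIM (what is proved, stated in full; the proofs are below) =====
def Claim_equal_solution : Prop := ∀ (schedule : List (List String)), Dom_solution schedule → Pre_solution schedule → Spec_solution schedule (solution schedule)

-- ===== LEMMAS AND PROOFS =====

-- proof-side notions: the (day, slot) marks of one token group / of a token list,
-- the day-state produced by marking a list of slots, and the dict↔set invariant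
def pvGrp (d tc : Int) (big : Bool) : List (Int × Int) :=
  if big then [(d, tc), (d, tc + 5), (d, tc + 10)]
  else [(d, tc), (d, tc + 5), (d, tc + 10), (d, tc + 15), (d, tc + 20), (d, tc + 25)]

def pvPMarks (big : Bool) : List String → Int → List (Int × Int)
  | [], _ => []
  | t :: rest, d =>
    match PySem.Dict.get? pvDayMap t with
    | some d' => pvPMarks big rest d'
    | none => pvGrp d ((pvTokVal t).getD 0) big ++ pvPMarks big rest 0

def pvMarkList (ms : List (Int × Int)) (day : List (PySem.Dict Int Int)) : List (PySem.Dict Int Int) :=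
  ms.foldl (fun dy m => pvMarkSlot dy m.1 m.2) day

def pvInv (day : List (PySem.Dict Int Int)) (occ : List (Int × Int)) : Prop :=
  ∀ d tc : Int, 0 ≤ d → pvRowGet day d tc = (if (d, tc) ∈ occ then 1 else 0)

-- B's parse is the proof-side pvPMarks
lemma pvGrp_map (d s : Int) (big : Bool) :
    (PySem.List.pyRange 0 (if big then 3 else 6) 1).map (fun k => (d, s + 5 * k)) = pvGrp d s big := by
  cases big
  · rw [show PySem.List.pyRange 0 (if false then 3 else 6) 1 = [0,1,2,3,4,5] from rfl]
    simp [pvGrp]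
  · rw [show PySem.List.pyRange 0 (if true then 3 else 6) 1 = [0,1,2] from rfl]
    simp [pvGrp]

lemma pvParse_aux (big : Bool) (span : Int) (hspan : span = if big then 3 else 6) (toks : List String) :
    ∀ (acc : List (Int × Int)) (d : Int),
    (toks.foldl (fun (acc : List (Int × Int) × Int) t =>
      match PySem.Dict.get? pvDayMap t with
      | some d' => (acc.1, d')
      | none =>
        let s := (pvTokVal t).getD 0
        ((PySem.List.pyRange 0 span 1).foldl (fun ms k => ms ++ [(acc.2, s + 5 * k)]) acc.1, 0)) (acc, d)).1
    = acc ++ pvPMarks big toks d := by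
  induction toks with
  | nil => intro acc d; simp [pvPMarks]
  | cons t rest ih =>
    intro acc d
    simp only [List.foldl_cons, pvPMarks]
    cases h : PySem.Dict.get? pvDayMap t with
    | some d' => exact ih acc d'
    | none =>
      rw [PySem.List.foldl_append_singleton_eq_map, ih, hspan, pvGrp_map, List.append_assoc]

lemma pvParse_eq (opt : String) :
    pvParse opt = pvPMarks (decide ((PySem.Str.split₀ opt).length > 2)) (PySem.Str.split₀ opt) 0 := by
  unfold pvParse
  rw [pvParse_aux (decide ((PySem.Str.split₀ opt).length > 2)) _
      (by by_cases h : (PySem.Str.split₀ opt).length > 2 <;> simp [h])]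
  simp

lemma pvDayMap_get?_nonneg (t : String) (d : Int) (h : PySem.Dict.get? pvDayMap t = some d) :
    0 ≤ d := by
  rw [show pvDayMap = PySem.Dict.mk [("MO",0),("TU",1),("WE",2),("TH",3),("FR",4)] from rfl] at h
  simp only [PySem.Dict.get?_mk_cons] at h
  repeat' split at h
  all_goals cases h
  all_goals decide

-- marking one slot changes exactly that (day, slot) reading
lemma pvRowGet_markSlot (day : List (PySem.Dict Int Int)) (d tc d' tc' : Int)
    (hd : 0 ≤ d) (hlt : d.toNat < day.length) (hd' : 0 ≤ d') :
    pvRowGet (pvMarkSlot day d tc) d' tc' =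
      if d' = d ∧ tc' = tc then 1 else pvRowGet day d' tc' := by
  unfold pvRowGet pvMarkSlot
  rw [PySem.List.pySetD_of_nonneg _ _ hd, PySem.List.pyGetD_of_nonneg _ _ hd',
      PySem.List.pyGetD_of_nonneg _ _ hd']
  by_cases hdd : d' = d
  · subst hdd
    rw [List.getD_eq_getElem?_getD, List.getElem?_set_self (by omega), Option.getD_some]
    rw [PySem.Dict.getD_insert, PySem.List.pyGetD_of_nonneg _ _ hd]
    rw [List.getD_eq_getElem?_getD]
    simp
  · have hne : d.toNat ≠ d'.toNat := by omega
    rw [List.getD_eq_getElem?_getD, List.getElem?_set_ne hne, ← List.getD_eq_getElem?_getD]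
    simp [hdd]

lemma pvRow0_aux (tc : Int) (l : List Int) : ∀ (dct : PySem.Dict Int Int), (∀ x, dct.getD x 0 = 0) →
    (l.foldl (fun t c => t.insert c 0) dct).getD tc 0 = 0 := by
  induction l with
  | nil => intro dct h; exact h tc
  | cons c rest ih =>
    intro dct h
    simp only [List.foldl_cons]
    exact ih _ (fun x => by rw [PySem.Dict.getD_insert]; split <;> simp [h])

lemma pvRow0_getD (tc : Int) : pvRow0.getD tc 0 = 0 :=
  pvRow0_aux tc (PySem.List.pyRange 90 211 5) PySem.Dict.empty (fun x => PySem.Dict.getD_empty x 0)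

lemma pvRowGet_init (n : Nat) (d tc : Int) (hd : 0 ≤ d) : pvRowGet (pvInitDay n) d tc = 0 := by
  unfold pvRowGet pvInitDay
  rw [PySem.List.pyGetD_of_nonneg _ _ hd]
  by_cases h : d.toNat < n
  · rw [PySem.List.getD_map_range _ _ _ _ h]
    exact pvRow0_getD tc
  · rw [List.getD_eq_getElem?_getD, List.getElem?_eq_none (by simp_all)]
    exact PySem.Dict.getD_empty tc 0

lemma pvPlace_append (a b : List (Int × Int)) : ∀ occ : PySem.Set (Int × Int),
    pvPlace (a ++ b) occ = (pvPlace a occ).bind (pvPlace b) := by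
  induction a with
  | nil => intro occ; simp [pvPlace]
  | cons m ms ih =>
    intro occ
    simp only [List.cons_append, pvPlace]
    split
    · rfl
    · exact ih _

-- A checks a whole block against the dicts, B inserts its marks one by one into the set:
-- on a duplicate-free block the two agree, and the invariant is preserved
lemma pvPlace_spec (ms : List (Int × Int)) (day : List (PySem.Dict Int Int))
    (occ : PySem.Set (Int × Int)) (hInv : pvInv day occ) (hnd : ms.Nodup)
    (hb : ∀ m ∈ ms, 0 ≤ m.1 ∧ m.1.toNat < day.length) :
    (pvPlace ms occ = none → ¬ (∀ m ∈ ms, pvRowGet day m.1 m.2 = 0)) ∧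
    (∀ occ', pvPlace ms occ = some occ' →
      (∀ m ∈ ms, pvRowGet day m.1 m.2 = 0) ∧ pvInv (pvMarkList ms day) occ' ∧
      (pvMarkList ms day).length = day.length) := by
  induction ms generalizing day occ with
  | nil =>
    refine ⟨fun h => by simp [pvPlace] at h, fun occ' h => ?_⟩
    simp only [pvPlace, Option.some.injEq] at h
    subst h
    exact ⟨by simp, hInv, rfl⟩
  | cons m ms ih =>
    have hm := hb m (List.mem_cons_self)
    have hbs : ∀ m' ∈ ms, 0 ≤ m'.1 ∧ m'.1.toNat < day.length :=
      fun m' hm' => hb m' (List.mem_cons_of_mem _ hm')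
    by_cases hmem : m ∈ occ
    · have hplace : pvPlace (m :: ms) occ = none := by simp [pvPlace, PySem.Set.contains, hmem]
      refine ⟨fun _ hall => ?_, fun occ' h => by rw [hplace] at h; cases h⟩
      have h1 := hall m (List.mem_cons_self)
      have h2 := hInv m.1 m.2 hm.1
      rw [h1] at h2
      simp [hmem] at h2
    · have hplace : pvPlace (m :: ms) occ = pvPlace ms (PySem.Set.add occ m) := by
        simp [pvPlace, PySem.Set.contains, hmem]
      have hlen1 : (pvMarkSlot day m.1 m.2).length = day.length :=
        PySem.List.length_pySetD day m.1 _
      have hInv1 : pvInv (pvMarkSlot day m.1 m.2) (PySem.Set.add occ m) := by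
        intro d tc hd0
        rw [pvRowGet_markSlot day m.1 m.2 d tc hm.1 hm.2 hd0]
        by_cases hdm : d = m.1 ∧ tc = m.2
        · have hmemadd : (d, tc) ∈ PySem.Set.add occ m := by
            rw [PySem.Set.mem_add]
            right
            rw [hdm.1, hdm.2]
          rw [if_pos hdm, if_pos hmemadd]
        · have hneq : (d, tc) ≠ m := by
            intro he
            exact hdm ⟨congrArg Prod.fst he, congrArg Prod.snd he⟩
          rw [if_neg hdm, hInv d tc hd0]
          have hiff : ((d, tc) ∈ PySem.Set.add occ m) ↔ ((d, tc) ∈ occ) := by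
            rw [PySem.Set.mem_add]
            simp [hneq]
          simp only [hiff]
      have hbs1 : ∀ m' ∈ ms, 0 ≤ m'.1 ∧ m'.1.toNat < (pvMarkSlot day m.1 m.2).length := by
        rw [hlen1]; exact hbs
      have ihr := ih (pvMarkSlot day m.1 m.2) (PySem.Set.add occ m) hInv1 hnd.of_cons hbs1
      have hmm : m ∉ ms := (List.nodup_cons.mp hnd).1
      have hrel : ∀ m' ∈ ms, pvRowGet (pvMarkSlot day m.1 m.2) m'.1 m'.2 = pvRowGet day m'.1 m'.2 := by
        intro m' hm'
        rw [pvRowGet_markSlot day m.1 m.2 m'.1 m'.2 hm.1 hm.2 (hbs m' hm').1]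
        have hne : ¬(m'.1 = m.1 ∧ m'.2 = m.2) := by
          intro he
          exact hmm ((Prod.ext he.1.symm he.2.symm : m = m') ▸ hm')
        rw [if_neg hne]
      constructor
      · intro hnone hall
        rw [hplace] at hnone
        refine ihr.1 hnone (fun m' hm' => ?_)
        rw [hrel m' hm']
        exact hall m' (List.mem_cons_of_mem _ hm')
      · intro occ' hsome
        rw [hplace] at hsome
        obtain ⟨hall1, hinv', hlen'⟩ := ihr.2 occ' hsome
        refine ⟨?_, hinv', ?_⟩
        · intro m' hm'
          rcases List.mem_cons.mp hm' with he | hin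
          · subst he
            rw [hInv m'.1 m'.2 hm.1]
            simp [hmem]
          · rw [← hrel m' hin]
            exact hall1 m' hin
        · rw [show pvMarkList (m :: ms) day = pvMarkList ms (pvMarkSlot day m.1 m.2) from rfl,
              hlen', hlen1]

lemma pvTokens_spec (big : Bool) (toks : List String) :
    ∀ (day : List (PySem.Dict Int Int)) (occ : PySem.Set (Int × Int)) (tempday : Int),
    pvInv day occ → 0 ≤ tempday → tempday.toNat < day.length →
    (∀ t ∈ toks, pvTokOK day.length big t = true) →
    (match pvPlace (pvPMarks big toks tempday) occ with
     | some occ' => ∃ day', pvTokens big toks day tempday = (day', true) ∧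
         pvInv day' occ' ∧ day'.length = day.length
     | none => (pvTokens big toks day tempday).2 = false) := by
  induction toks with
  | nil =>
    intro day occ tempday hInv _ _ _
    exact ⟨day, rfl, hInv, rfl⟩
  | cons t rest ih =>
    intro day occ tempday hInv htd0 htdlt hall
    have htok := hall t List.mem_cons_self
    have hrest := fun t' ht' => hall t' (List.mem_cons_of_mem _ ht')
    cases hday : PySem.Dict.get? pvDayMap t with
    | some d' =>
      have h0 : 0 ≤ d' := pvDayMap_get?_nonneg t d' hday
      have hlt : d'.toNat < day.length := by
        unfold pvTokOK at htok
        rw [hday] at htok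
        exact of_decide_eq_true htok
      have hred : pvTokens big (t :: rest) day tempday = pvTokens big rest day d' := by
        simp [pvTokens, hday]
      have hred2 : pvPMarks big (t :: rest) tempday = pvPMarks big rest d' := by
        simp [pvPMarks, hday]
      rw [hred2, hred]
      exact ih day occ d' hInv h0 hlt hrest
    | none =>
      have hred2 : pvPMarks big (t :: rest) tempday
          = pvGrp tempday ((pvTokVal t).getD 0) big ++ pvPMarks big rest 0 := by
        simp [pvPMarks, hday]
      rw [hred2, pvPlace_append]
      have hnd : (pvGrp tempday ((pvTokVal t).getD 0) big).Nodup := by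
        cases big <;> simp [pvGrp, Prod.ext_iff]
      have hgb : ∀ m ∈ pvGrp tempday ((pvTokVal t).getD 0) big,
          0 ≤ m.1 ∧ m.1.toNat < day.length := by
        cases big <;> simp_all [pvGrp]
      have hps := pvPlace_spec (pvGrp tempday ((pvTokVal t).getD 0) big) day occ hInv hnd hgb
      cases hpg : pvPlace (pvGrp tempday ((pvTokVal t).getD 0) big) occ with
      | none =>
        simp only [Option.bind_none]
        have hchk := hps.1 hpg
        cases big with
        | true =>
          have hchk' : ¬(pvRowGet day tempday ((pvTokVal t).getD 0) = 0 ∧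
              pvRowGet day tempday ((pvTokVal t).getD 0 + 5) = 0 ∧
              pvRowGet day tempday ((pvTokVal t).getD 0 + 10) = 0) := by
            simpa [pvGrp] using hchk
          simp [pvTokens, hday, hchk']
        | false =>
          have hchk' : ¬(pvRowGet day tempday ((pvTokVal t).getD 0) = 0 ∧
              pvRowGet day tempday ((pvTokVal t).getD 0 + 5) = 0 ∧
              pvRowGet day tempday ((pvTokVal t).getD 0 + 10) = 0 ∧
              pvRowGet day tempday ((pvTokVal t).getD 0 + 15) = 0 ∧
              pvRowGet day tempday ((pvTokVal t).getD 0 + 20) = 0 ∧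
              pvRowGet day tempday ((pvTokVal t).getD 0 + 25) = 0) := by
            simpa [pvGrp] using hchk
          simp [pvTokens, hday, hchk']
      | some occ1 =>
        simp only [Option.bind_some]
        obtain ⟨hchk, hinv1, hlen1⟩ := hps.2 occ1 hpg
        have hred : pvTokens big (t :: rest) day tempday
            = pvTokens big rest (pvMarkList (pvGrp tempday ((pvTokVal t).getD 0) big) day) 0 := by
          cases big with
          | true =>
            have hc : pvRowGet day tempday ((pvTokVal t).getD 0) = 0 ∧
                pvRowGet day tempday ((pvTokVal t).getD 0 + 5) = 0 ∧
                pvRowGet day tempday ((pvTokVal t).getD 0 + 10) = 0 := by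
              simpa [pvGrp] using hchk
            simp [pvTokens, hday, hc, pvMarkList, pvGrp]
          | false =>
            have hc : pvRowGet day tempday ((pvTokVal t).getD 0) = 0 ∧
                pvRowGet day tempday ((pvTokVal t).getD 0 + 5) = 0 ∧
                pvRowGet day tempday ((pvTokVal t).getD 0 + 10) = 0 ∧
                pvRowGet day tempday ((pvTokVal t).getD 0 + 15) = 0 ∧
                pvRowGet day tempday ((pvTokVal t).getD 0 + 20) = 0 ∧
                pvRowGet day tempday ((pvTokVal t).getD 0 + 25) = 0 := by
              simpa [pvGrp] using hchk
            simp [pvTokens, hday, hc, pvMarkList, pvGrp]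
        rw [hred]
        have hmll : (pvMarkList (pvGrp tempday ((pvTokVal t).getD 0) big) day).length
            = day.length := hlen1
        have ihx := ih (pvMarkList (pvGrp tempday ((pvTokVal t).getD 0) big) day) occ1 0
          hinv1 le_rfl (by rw [hmll]; omega) (by rw [hmll]; exact hrest)
        cases hpr : pvPlace (pvPMarks big rest 0) occ1 with
        | some occ' =>
          rw [hpr] at ihx
          obtain ⟨day', he, hi, hl⟩ := ihx
          exact ⟨day', he, hi, by rw [hl, hmll]⟩
        | none =>
          rw [hpr] at ihx
          exact ihx

lemma pvCombo_spec (ts : List String) :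
    ∀ (day : List (PySem.Dict Int Int)) (occ : PySem.Set (Int × Int)),
    pvInv day occ → 0 < day.length →
    (∀ ct ∈ ts, pvOptOK day.length ct = true) →
    (match pvPlace (ts.flatMap pvParse) occ with
     | some occ' => pvCombo ts day = true ∧ ∃ day', pvInv day' occ' ∧ day'.length = day.length
     | none => pvCombo ts day = false) := by
  induction ts with
  | nil =>
    intro day occ hInv _ _
    exact ⟨rfl, day, hInv, rfl⟩
  | cons ct rest ih =>
    intro day occ hInv hpos hopt
    rw [List.flatMap_cons, pvParse_eq ct, pvPlace_append]
    have hopt1 := hopt ct List.mem_cons_self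
    have hoptr := fun c hc => hopt c (List.mem_cons_of_mem _ hc)
    have htoks : ∀ t ∈ PySem.Str.split₀ ct,
        pvTokOK day.length (decide ((PySem.Str.split₀ ct).length > 2)) t = true := by
      rw [pvOptOK] at hopt1
      exact List.all_eq_true.mp hopt1
    have hts := pvTokens_spec (decide ((PySem.Str.split₀ ct).length > 2)) (PySem.Str.split₀ ct)
      day occ 0 hInv le_rfl (by simpa using hpos) htoks
    cases hpg : pvPlace (pvPMarks (decide ((PySem.Str.split₀ ct).length > 2)) (PySem.Str.split₀ ct) 0) occ with
    | none =>
      rw [hpg] at hts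
      simp only [Option.bind_none]
      simp [pvCombo, hts]
    | some occ1 =>
      rw [hpg] at hts
      obtain ⟨day', he, hinv', hlen'⟩ := hts
      simp only [Option.bind_some]
      have hcred : pvCombo (ct :: rest) day = pvCombo rest day' := by
        simp [pvCombo, he]
      rw [hcred]
      have ihx := ih day' occ1 hinv' (hlen' ▸ hpos) (by rw [hlen']; exact hoptr)
      cases hpr : pvPlace (rest.flatMap pvParse) occ1 with
      | some occ' =>
        rw [hpr] at ihx
        obtain ⟨hc, day2, hi2, hl2⟩ := ihx
        exact ⟨hc, day2, hi2, by rw [hl2, hlen']⟩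
      | none =>
        rw [hpr] at ihx
        exact ihx

lemma pvCount_spec (schedule : List (List String)) :
    ∀ occ : PySem.Set (Int × Int),
    pvCount (schedule.map (fun opts => opts.map pvParse)) occ
      = ((pvProd schedule).countP (fun ts => (pvPlace (ts.flatMap pvParse) occ).isSome) : Int) := by
  induction schedule with
  | nil =>
    intro occ
    simp [pvCount, pvProd, pvPlace]
  | cons opts rest ih =>
    intro occ
    have key : ∀ o : String,
        ((List.countP (fun ts => (pvPlace (ts.flatMap pvParse) occ).isSome)
          ((pvProd rest).map (fun t => o :: t)) : Nat) : Int)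
        = (match pvPlace (pvParse o) occ with
           | some occ1 => pvCount (rest.map (fun opts => opts.map pvParse)) occ1
           | none => 0) := by
      intro o
      rw [List.countP_map]
      cases hpo : pvPlace (pvParse o) occ with
      | none =>
        have hz : List.countP ((fun ts => (pvPlace (ts.flatMap pvParse) occ).isSome) ∘
            (fun t => o :: t)) (pvProd rest) = 0 := by
          apply List.countP_eq_zero.mpr
          intro ts _
          simp [Function.comp, List.flatMap_cons, pvPlace_append, hpo]
        rw [hz]
        rfl
      | some occ1 =>
        have hc : List.countP ((fun ts => (pvPlace (ts.flatMap pvParse) occ).isSome) ∘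
            (fun t => o :: t)) (pvProd rest)
            = List.countP (fun ts => (pvPlace (ts.flatMap pvParse) occ1).isSome) (pvProd rest) := by
          apply List.countP_congr
          intro ts _
          simp [Function.comp, List.flatMap_cons, pvPlace_append, hpo]
        rw [hc, ← ih occ1]
    rw [show pvProd (opts :: rest) = opts.flatMap (fun x => (pvProd rest).map (fun t => x :: t)) from rfl]
    rw [List.countP_flatMap]
    rw [show (opts :: rest).map (fun opts => opts.map pvParse)
        = (opts.map pvParse) :: rest.map (fun opts => opts.map pvParse) from rfl]
    rw [show pvCount ((opts.map pvParse) :: rest.map (fun opts => opts.map pvParse)) occ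
        = (opts.map pvParse).foldl (fun tot ms =>
            tot + (match pvPlace ms occ with
                   | some occ' => pvCount (rest.map (fun opts => opts.map pvParse)) occ'
                   | none => 0)) 0 from rfl]
    rw [PySem.List.foldl_add, List.map_map]
    push_cast
    rw [zero_add]
    congr 1
    rw [List.map_map]
    apply List.map_congr_left
    intro o _
    exact (key o).symm

lemma pvMem_prod (schedule : List (List String)) :
    ∀ ts ∈ pvProd schedule, ∀ ct ∈ ts, ∃ opts ∈ schedule, ct ∈ opts := by
  induction schedule with
  | nil =>
    intro ts hts
    simp [pvProd] at hts
    subst hts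
    intro ct hct
    cases hct
  | cons opts rest ih =>
    intro ts hts
    simp only [pvProd, List.mem_flatMap, List.mem_map] at hts
    obtain ⟨o, ho, t', ht', rfl⟩ := hts
    intro ct hct
    rcases List.mem_cons.mp hct with rfl | hin
    · exact ⟨opts, List.mem_cons_self, ho⟩
    · obtain ⟨opts', h1, h2⟩ := ih t' ht' ct hin
      exact ⟨opts', List.mem_cons_of_mem _ h1, h2⟩

lemma pvProd_eq_nil (schedule : List (List String)) (h : ∃ opts ∈ schedule, opts = []) :
    pvProd schedule = [] := by
  induction schedule with
  | nil => simp at h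
  | cons opts rest ih =>
    obtain ⟨o, ho, he⟩ := h
    rcases List.mem_cons.mp ho with rfl | hin
    · subst he; rfl
    · show opts.flatMap (fun x => (pvProd rest).map (fun t => x :: t)) = []
      rw [ih ⟨o, hin, he⟩]
      simp

-- ===== VERDICT (by name: the statement is the Claim_ definition above) =====
theorem solution_spec : Claim_equal_solution := by
  intro schedule _ hpre
  unfold Spec_solution
  by_cases hemp : schedule.any (fun opts => opts.isEmpty) = true
  · -- some subject has no options: the product is empty, both sides return 0
    have hex : ∃ opts ∈ schedule, opts = [] := by
      obtain ⟨o, ho, he⟩ := List.any_eq_true.mp hemp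
      exact ⟨o, ho, List.isEmpty_iff.mp he⟩
    have hpn := pvProd_eq_nil schedule hex
    show ((pvProd schedule).length : Int) - ((pvProd schedule).foldl
      (fun f ts => if pvCombo ts (pvInitDay schedule.length) then f else f + 1) (0:Int))
      = solution_alt schedule
    rw [hpn]
    unfold solution_alt
    rw [if_pos hemp]
    rfl
  · have hpre' : ∀ opts ∈ schedule, ∀ opt ∈ opts, pvOptOK schedule.length opt = true := by
      rcases hpre with ⟨o, ho, he⟩ | h
      · exact absurd (List.any_eq_true.mpr ⟨o, ho, by simp [he]⟩) hemp
      · exact h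
    have halt : solution_alt schedule
        = pvCount (schedule.map (fun opts => opts.map pvParse)) PySem.Set.empty := by
      unfold solution_alt
      rw [if_neg hemp]
    by_cases hnil : schedule = []
    · subst hnil; rfl
    · have hpos : 0 < schedule.length := List.length_pos_of_ne_nil hnil
      have hinit : pvInv (pvInitDay schedule.length) PySem.Set.empty := by
        intro d tc hd
        rw [pvRowGet_init _ _ _ hd]
        simp [PySem.Set.empty]
      have hlen : (pvInitDay schedule.length).length = schedule.length := by simp [pvInitDay]
      have hper : ∀ ts ∈ pvProd schedule,
          pvCombo ts (pvInitDay schedule.length)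
            = (pvPlace (ts.flatMap pvParse) PySem.Set.empty).isSome := by
        intro ts hts
        have hopt : ∀ ct ∈ ts, pvOptOK (pvInitDay schedule.length).length ct = true := by
          intro ct hct
          obtain ⟨opts, hop, hco⟩ := pvMem_prod schedule ts hts ct hct
          rw [hlen]
          exact hpre' opts hop ct hco
        have hcs := pvCombo_spec ts (pvInitDay schedule.length) PySem.Set.empty hinit
          (by rw [hlen]; exact hpos) hopt
        cases hpr : pvPlace (ts.flatMap pvParse) PySem.Set.empty with
        | some occ' =>
          rw [hpr] at hcs
          rw [hcs.1]
          rfl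
        | none =>
          rw [hpr] at hcs
          rw [hcs]
          rfl
      have hfold : (pvProd schedule).foldl
          (fun f ts => if pvCombo ts (pvInitDay schedule.length) then f else f + 1) (0:Int)
          = (((pvProd schedule).countP
              (fun ts => !(pvCombo ts (pvInitDay schedule.length))) : Nat) : Int) := by
        have hfn : (fun (f : Int) ts => if pvCombo ts (pvInitDay schedule.length) then f else f + 1)
            = (fun (f : Int) ts =>
                if (!(pvCombo ts (pvInitDay schedule.length))) = true then f + 1 else f) := by
          funext f ts
          cases pvCombo ts (pvInitDay schedule.length) <;> simp
        rw [hfn, PySem.List.foldl_count_if]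
        simp
      have hA : solution schedule = ((pvProd schedule).length : Int)
          - (((pvProd schedule).countP
              (fun ts => !(pvCombo ts (pvInitDay schedule.length))) : Nat) : Int) := by
        show ((pvProd schedule).length : Int) - ((pvProd schedule).foldl
          (fun f ts => if pvCombo ts (pvInitDay schedule.length) then f else f + 1) (0:Int)) = _
        rw [hfold]
      have hB : solution_alt schedule = (((pvProd schedule).countP
          (fun ts => (pvPlace (ts.flatMap pvParse) PySem.Set.empty).isSome) : Nat) : Int) := by
        rw [halt]
        exact pvCount_spec schedule PySem.Set.empty
      rw [hA, hB]
      have hq : (pvProd schedule).countP (fun ts => !(pvCombo ts (pvInitDay schedule.length)))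
          = (pvProd schedule).countP
              (fun ts => !((pvPlace (ts.flatMap pvParse) PySem.Set.empty).isSome)) := by
        apply List.countP_congr
        intro ts hts
        rw [hper ts hts]
      have hnot : (pvProd schedule).countP
          (fun ts => !((pvPlace (ts.flatMap pvParse) PySem.Set.empty).isSome))
          = (pvProd schedule).countP
              (fun a => decide ¬((pvPlace (a.flatMap pvParse) PySem.Set.empty).isSome = true)) := by
        apply List.countP_congr
        intro ts _
        simp
      have hsum := List.length_eq_countP_add_countP
        (fun ts => (pvPlace (ts.flatMap pvParse) PySem.Set.empty).isSome) (l := pvProd schedule)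
      rw [hq, hnot]
      omega
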